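-- pv_equiv track=rewrite | github.com/mustafa-bharmal-shipveho/brainstack | agent/tools/render_pending_summary.py | _is_noise_evidence
-- ===== SOURCE A (Python) =====
-- _NOISE_PATH_PREFIXES = (
--     "/tmp/",
--     "/var/folders/",
--     "/private/tmp/",
--     "/private/var/folders/",
-- )
--
-- _NOISE_SUBSTRINGS = (
--     "-test-",
--     "-smoke-",
--     "/sandbox/",
--     "/sandbox-",
--     "-sandbox/",
--     "-sandbox-",
--     "/test-fixtures/",
--     "test_home/",
--     "-test/",
--     "-smoke/",
--     # brainstack's own redaction-test loop emits "FAILURE in claude-code: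
--     # High-stakes op FAILED (secret): ..." for every TruffleHog test case.
--     # On the maintainer's brain this produced a 5,700-cluster dominating
--     # the queue — pure test infra, not a real lesson.
--     "FAILED (secret)",
--     "Detected potential secret",
-- )
--
-- def _is_noise_evidence(eid: str) -> bool:
--     """One evidence_id (or claim/conditions blob) is noise if it contains
--     a tmp/sandbox path prefix OR a test/smoke/sandbox substring. Bare ISO
--     timestamps are never noise (they're the live-hook capture format).
--
--     Codex 2026-05-05 P2: the path-prefix check used to be `startswith()`,
--     which missed claims like "Command failed: cd /tmp/brainstack-run"
--     (path is mid-string, not at the start). Switched to substring match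
--     so embedded tmp paths in claim text are caught. The user-facing
--     consequence is that test-fixture clusters with /tmp/ in the claim
--     string are now filtered from the top-5 review list."""
--     if not isinstance(eid, str):
--         return False
--     if any(prefix in eid for prefix in _NOISE_PATH_PREFIXES):
--         return True
--     if any(sub in eid for sub in _NOISE_SUBSTRINGS):
--         return True
--     return False
-- ===== SOURCE B (Python) =====
-- _ALL_NOISE_PATTERNS = (
--     "/tmp/",
--     "/var/folders/",
--     "/private/tmp/",
--     "/private/var/folders/",
--     "-test-",
--     "-smoke-",
--     "/sandbox/",
--     "/sandbox-",
--     "-sandbox/",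
--     "-sandbox-",
--     "/test-fixtures/",
--     "test_home/",
--     "-test/",
--     "-smoke/",
--     "FAILED (secret)",
--     "Detected potential secret",
-- )
--
--
-- def _is_noise_evidence(eid: str) -> bool:
--     if not isinstance(eid, str):
--         return False
--     # Single pass: `active` holds the still-unmatched suffixes of every
--     # pattern whose prefix has matched ending at the current character
--     # (NFA-state simulation of the multi-pattern match).
--     active = []
--     for ch in eid:
--         active = [p[1:] for p in active + list(_ALL_NOISE_PATTERNS)
--                   if p and p[0] == ch]
--         if "" in active:
--             return True
--     return False
-- ===== Notes on version B (the rewrite author's own statement) =====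
-- stated objective: alternative
-- what changed: A runs up to 14 independent substring-containment scans over the string; B makes one left-to-right pass that maintains the set of partially-matched pattern suffixes (an NFA-state simulation of the multi-pattern match) and reports success as soon as some suffix is fully consumed.
import Mathlib
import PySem

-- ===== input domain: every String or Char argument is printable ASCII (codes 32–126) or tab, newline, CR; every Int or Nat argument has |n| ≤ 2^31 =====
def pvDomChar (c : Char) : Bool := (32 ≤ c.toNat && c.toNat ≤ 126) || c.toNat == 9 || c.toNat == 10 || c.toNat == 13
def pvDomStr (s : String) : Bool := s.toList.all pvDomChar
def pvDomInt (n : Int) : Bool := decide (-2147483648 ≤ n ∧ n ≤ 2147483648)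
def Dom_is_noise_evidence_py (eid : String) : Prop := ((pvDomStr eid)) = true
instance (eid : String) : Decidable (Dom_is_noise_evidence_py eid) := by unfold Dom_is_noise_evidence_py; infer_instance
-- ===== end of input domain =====

-- B replaces A's 14 independent substring scans by one left-to-right pass maintaining the
-- set of partially-matched pattern suffixes (NFA-state simulation). Return value unchanged.

-- ===== PORT A =====
-- A's isinstance(eid, str) guard is vacuous here: the argument is typed String.
def noisePathPrefixes : List String :=
  ["/tmp/", "/var/folders/", "/private/tmp/", "/private/var/folders/"]

def noiseSubstrings : List String :=
  ["-test-", "-smoke-", "/sandbox/", "/sandbox-", "-sandbox/", "-sandbox-",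
   "/test-fixtures/", "test_home/", "-test/", "-smoke/",
   "FAILED (secret)", "Detected potential secret"]

def is_noise_evidence_py (eid : String) : Bool :=
  if noisePathPrefixes.any (fun prefix_ => PySem.Str.isIn prefix_ eid) then true
  else if noiseSubstrings.any (fun sub => PySem.Str.isIn sub eid) then true
  else false

-- ===== PORT B =====
-- all 16 literal patterns, as char lists
def noiseAllPatterns : List (List Char) :=
  ["/tmp/".toList, "/var/folders/".toList, "/private/tmp/".toList, "/private/var/folders/".toList,
   "-test-".toList, "-smoke-".toList, "/sandbox/".toList, "/sandbox-".toList, "-sandbox/".toList,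
   "-sandbox-".toList, "/test-fixtures/".toList, "test_home/".toList, "-test/".toList,
   "-smoke/".toList, "FAILED (secret)".toList, "Detected potential secret".toList]

-- B's for-loop: update the active partial-match suffixes with the current char, test for ''
def noiseScan (active : List (List Char)) : List Char → Bool
  | [] => false
  | c :: t =>
    let a := ((active ++ noiseAllPatterns).filter
                (fun p => match p with | [] => false | q :: _ => q == c)).map List.tail
    if a.contains ([] : List Char) then true else noiseScan a t

def is_noise_evidence_py_alt (eid : String) : Bool :=
  noiseScan [] eid.toList

-- ===== PRECONDITION & SPEC =====
def Spec_is_noise_evidence_py (eid : String) (out : Bool) : Prop := out = is_noise_evidence_py_alt eid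
instance (eid : String) (out : Bool) : Decidable (Spec_is_noise_evidence_py eid out) := by unfold Spec_is_noise_evidence_py; infer_instance

-- ===== CLAIM (what is proved, stated in full; the proofs are below) =====
def Claim_equal_is_noise_evidence_py : Prop := ∀ (eid : String), Dom_is_noise_evidence_py eid → Spec_is_noise_evidence_py eid (is_noise_evidence_py eid)

-- ===== LEMMAS AND PROOFS =====

-- invariant of the scan: it succeeds iff some active suffix (nonempty) is a prefix of the
-- rest of the string, or some pattern (nonempty) occurs as a substring of the rest
theorem noiseScan_inv (cs : List Char) : ∀ (active : List (List Char)),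
    noiseScan active cs = true ↔
      ((∃ r ∈ active, r ≠ [] ∧ r <+: cs) ∨ (∃ p ∈ noiseAllPatterns, p ≠ [] ∧ p <:+: cs)) := by
  induction cs with
  | nil =>
    intro active
    simp [noiseScan, List.prefix_nil, List.infix_nil]
  | cons c t ih =>
    intro active
    rw [noiseScan]
    set a := ((active ++ noiseAllPatterns).filter
                (fun p => match p with | [] => false | q :: _ => q == c)).map List.tail with ha
    have hmem : ∀ r : List Char, r ∈ a ↔
        ∃ q, (q ∈ active ∨ q ∈ noiseAllPatterns) ∧ q.head? = some c ∧ q.tail = r := by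
      intro r
      simp only [ha, List.mem_map, List.mem_filter, List.mem_append]
      constructor
      · rintro ⟨q, ⟨hq, hf⟩, rfl⟩
        cases q with
        | nil => simp at hf
        | cons x xs =>
          have hx : x = c := by simpa using hf
          exact ⟨x :: xs, hq, by simp [hx], rfl⟩
      · rintro ⟨q, hq, hh, rfl⟩
        cases q with
        | nil => simp at hh
        | cons x xs =>
          simp only [List.head?_cons, Option.some.injEq] at hh
          exact ⟨x :: xs, ⟨hq, by simp [hh]⟩, rfl⟩
    split_ifs with hnil
    · have hnil' : ([] : List Char) ∈ a := by simpa using hnil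
      obtain ⟨q, hq, hh, hta⟩ := (hmem []).mp hnil'
      cases q with
      | nil => simp at hh
      | cons x xs =>
        simp only [List.head?_cons, Option.some.injEq] at hh
        simp only [List.tail_cons] at hta
        have hpre : x :: xs <+: c :: t := by
          rw [hh, hta]; exact ⟨t, rfl⟩
        simp only [true_iff]
        rcases hq with h | h
        · exact Or.inl ⟨x :: xs, h, by simp, hpre⟩
        · exact Or.inr ⟨x :: xs, h, by simp, hpre.isInfix⟩
    · have hnil' : ([] : List Char) ∉ a := by simpa using hnil
      rw [ih a]
      constructor
      · rintro (⟨r, hr, hne, hpre⟩ | ⟨p, hp, hne, hinf⟩)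
        · obtain ⟨q, hq, hh, hta⟩ := (hmem r).mp hr
          cases q with
          | nil => simp at hh
          | cons x xs =>
            simp only [List.head?_cons, Option.some.injEq] at hh
            simp only [List.tail_cons] at hta
            have hpre' : x :: xs <+: c :: t := by
              rw [hh]
              exact (List.cons_prefix_cons).mpr ⟨rfl, hta ▸ hpre⟩
            rcases hq with h | h
            · exact Or.inl ⟨x :: xs, h, by simp, hpre'⟩
            · exact Or.inr ⟨x :: xs, h, by simp, hpre'.isInfix⟩
        · exact Or.inr ⟨p, hp, hne, List.infix_cons hinf⟩
      · rintro (⟨r, hr, hne, hpre⟩ | ⟨p, hp, hne, hinf⟩)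
        · cases r with
          | nil => exact absurd rfl hne
          | cons x xs =>
            obtain ⟨hx, hxs⟩ := (List.cons_prefix_cons).mp hpre
            have hxa : xs ∈ a := (hmem xs).mpr ⟨x :: xs, Or.inl hr, by simp [hx], rfl⟩
            cases xs with
            | nil => exact absurd hxa hnil'
            | cons y ys => exact Or.inl ⟨y :: ys, hxa, by simp, hxs⟩
        · rcases List.infix_cons_iff.mp hinf with hpre | hinf'
          · cases p with
            | nil => exact absurd rfl hne
            | cons x xs =>
              obtain ⟨hx, hxs⟩ := (List.cons_prefix_cons).mp hpre
              have hxa : xs ∈ a := (hmem xs).mpr ⟨x :: xs, Or.inr hp, by simp [hx], rfl⟩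
              cases xs with
              | nil => exact absurd hxa hnil'
              | cons y ys => exact Or.inl ⟨y :: ys, hxa, by simp, hxs⟩
          · exact Or.inr ⟨p, hp, hne, hinf'⟩

theorem noiseAllPatterns_eq :
    noiseAllPatterns = (noisePathPrefixes ++ noiseSubstrings).map String.toList := rfl

theorem noiseAllPatterns_ne_nil : ∀ p ∈ noiseAllPatterns, p ≠ [] := by decide

-- ===== VERDICT (by name: the statement is the Claim_ definition above) =====
theorem is_noise_evidence_py_spec : Claim_equal_is_noise_evidence_py := by
  intro eid _
  unfold Spec_is_noise_evidence_py is_noise_evidence_py_alt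
  have hA : is_noise_evidence_py eid =
      (noisePathPrefixes.any (fun s => PySem.Str.isIn s eid) ||
       noiseSubstrings.any (fun s => PySem.Str.isIn s eid)) := by
    unfold is_noise_evidence_py; split_ifs with h1 h2 <;> simp_all
  rw [hA, Bool.eq_iff_iff, noiseScan_inv eid.toList []]
  simp only [Bool.or_eq_true, List.any_eq_true, PySem.Str.isIn_eq,
    PySem.Chars.isIn_iff_infix, List.not_mem_nil, false_and, exists_false,
    exists_and_left, false_or]
  constructor
  · rintro (⟨s, hs, hinf⟩ | ⟨s, hs, hinf⟩)
    · refine ⟨s.toList, ?_, ?_, hinf⟩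
      · rw [noiseAllPatterns_eq]
        exact List.mem_map.mpr ⟨s, List.mem_append.mpr (Or.inl hs), rfl⟩
      · exact noiseAllPatterns_ne_nil _ (by
          rw [noiseAllPatterns_eq]
          exact List.mem_map.mpr ⟨s, List.mem_append.mpr (Or.inl hs), rfl⟩)
    · refine ⟨s.toList, ?_, ?_, hinf⟩
      · rw [noiseAllPatterns_eq]
        exact List.mem_map.mpr ⟨s, List.mem_append.mpr (Or.inr hs), rfl⟩
      · exact noiseAllPatterns_ne_nil _ (by
          rw [noiseAllPatterns_eq]
          exact List.mem_map.mpr ⟨s, List.mem_append.mpr (Or.inr hs), rfl⟩)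
  · rintro ⟨p, hp, _, hinf⟩
    rw [noiseAllPatterns_eq] at hp
    obtain ⟨s, hs, rfl⟩ := List.mem_map.mp hp
    rcases List.mem_append.mp hs with h | h
    · exact Or.inl ⟨s, h, hinf⟩
    · exact Or.inr ⟨s, h, hinf⟩
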